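-- pv_equiv track=rewrite | github.com/Nono123GitHub/Monkfish-School-Assistant | Main Interface/gui_main.py | get_instructions
-- ===== SOURCE A (Python) =====
-- def get_delta(p1, p2):
--     return (p2[0] - p1[0], p2[1] - p1[1])
--
-- def get_turn_instruction(current_delta, next_delta):
--     cross = current_delta[0] * next_delta[1] - current_delta[1] * next_delta[0]
--     dot = current_delta[0] * next_delta[0] + current_delta[1] * next_delta[1]
--     if cross > 0:
--         return "Turn right"
--     elif cross < 0:
--         return "Turn left"
--     elif dot < 0:
--         return "Turn around"
--     else:
--         return "Continue straight"
--
-- def get_instructions(path):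
--     if len(path) < 2:
--         return []
--     instructions = []
--     current_delta = get_delta(path[0], path[1])
--     step_count = 1
--     for i in range(1, len(path) - 1):
--         next_delta = get_delta(path[i], path[i + 1])
--         if next_delta == current_delta:
--             step_count += 1
--         else:
--             instructions.append(f"Go forward {step_count} step{'s' if step_count != 1 else ''}")
--             instructions.append(get_turn_instruction(current_delta, next_delta))
--             current_delta = next_delta
--             step_count = 1
--     instructions.append(f"Go forward {step_count} step{'s' if step_count != 1 else ''}")
--     return instructions
-- ===== SOURCE B (Python) =====
-- def get_delta(p1, p2):
--     return (p2[0] - p1[0], p2[1] - p1[1])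
--
-- def get_turn_instruction(current_delta, next_delta):
--     cross = current_delta[0] * next_delta[1] - current_delta[1] * next_delta[0]
--     dot = current_delta[0] * next_delta[0] + current_delta[1] * next_delta[1]
--     if cross > 0:
--         return "Turn right"
--     elif cross < 0:
--         return "Turn left"
--     elif dot < 0:
--         return "Turn around"
--     else:
--         return "Continue straight"
--
-- def _render(deltas):
--     # split at the first turning point and recurse on the suffix
--     j = next((k for k in range(1, len(deltas)) if deltas[k] != deltas[0]), len(deltas))
--     head = [f"Go forward {j} step{'s' if j != 1 else ''}"]
--     if j == len(deltas):
--         return head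
--     return head + [get_turn_instruction(deltas[0], deltas[j])] + _render(deltas[j:])
--
-- def get_instructions(path):
--     if len(path) < 2:
--         return []
--     return _render([get_delta(p, q) for p, q in zip(path, path[1:])])
-- ===== Notes on version B (the rewrite author's own statement) =====
-- stated objective: alternative
-- what changed: Replaces A's incremental state machine (current_delta/step_count accumulated across an indexed loop) with a recursive divide-and-render: build the delta list once, find the first turning point by search, emit the forward segment (count = that index) and the turn, and recurse on the suffix slice.
import Mathlib
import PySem

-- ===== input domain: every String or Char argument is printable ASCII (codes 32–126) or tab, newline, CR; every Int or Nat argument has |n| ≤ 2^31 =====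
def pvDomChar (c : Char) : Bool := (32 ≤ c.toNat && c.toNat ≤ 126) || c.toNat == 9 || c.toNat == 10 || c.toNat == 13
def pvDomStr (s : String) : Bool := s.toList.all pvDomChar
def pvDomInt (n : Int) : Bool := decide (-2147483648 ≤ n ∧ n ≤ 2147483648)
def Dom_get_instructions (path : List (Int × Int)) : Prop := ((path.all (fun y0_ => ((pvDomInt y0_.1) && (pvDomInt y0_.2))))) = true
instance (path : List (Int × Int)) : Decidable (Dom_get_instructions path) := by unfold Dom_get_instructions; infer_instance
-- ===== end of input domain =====

-- B replaces A's incremental state-machine loop by a recursive divide-and-render over the delta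
-- list: search for the first turning point, emit forward+turn, recurse on the suffix (alternative; same cost).

-- ===== PORT A =====
def get_delta (p1 p2 : Int × Int) : Int × Int := (p2.1 - p1.1, p2.2 - p1.2)

def get_turn_instruction (current_delta next_delta : Int × Int) : String :=
  let cross := current_delta.1 * next_delta.2 - current_delta.2 * next_delta.1
  let dot := current_delta.1 * next_delta.1 + current_delta.2 * next_delta.2
  if cross > 0 then "Turn right"
  else if cross < 0 then "Turn left"
  else if dot < 0 then "Turn around"
  else "Continue straight"

-- the f-string  f"Go forward {count} step{'s' if count != 1 else ''}"  (shared by both ports)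
def pvFwd (count : Int) : String :=
  "Go forward " ++ PySem.Int.toStr count ++ " step" ++ (if count ≠ 1 then "s" else "")

-- A's loop body, on the (instructions, current_delta, step_count) state
def pvStepA (st : List String × (Int × Int) × Int) (next_delta : Int × Int) :
    List String × (Int × Int) × Int :=
  if next_delta = st.2.1 then (st.1, st.2.1, st.2.2 + 1)
  else (st.1 ++ [pvFwd st.2.2, get_turn_instruction st.2.1 next_delta], next_delta, 1)

def get_instructions (path : List (Int × Int)) : List String :=
  if path.length < 2 then []
  else
    let current_delta :=
      get_delta (PySem.List.pyGetD path 0 (0, 0)) (PySem.List.pyGetD path 1 (0, 0))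
    let s := (PySem.List.pyRange 1 ((path.length : Int) - 1) 1).foldl
      (fun st i =>
        pvStepA st (get_delta (PySem.List.pyGetD path i (0, 0))
                              (PySem.List.pyGetD path (i + 1) (0, 0))))
      ([], current_delta, 1)
    s.1 ++ [pvFwd s.2.2]

-- ===== PORT B =====
-- Source B's generator search: index (within the tail) of the first delta ≠ deltas[0], else the tail's length;
-- Source B's j is this + 1
def pvFindK (d0 : Int × Int) : List (Int × Int) → Nat
  | [] => 0
  | x :: xs => if x = d0 then pvFindK d0 xs + 1 else 0

-- Source B's _render: split at the first turning point, recurse on the suffix slice deltas[j:]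
def pvRender : List (Int × Int) → List String
  | [] => []
  | d0 :: rest =>
    let j := pvFindK d0 rest + 1
    let head := [pvFwd (j : Int)]
    if j = rest.length + 1 then head
    else head ++ [get_turn_instruction d0 ((d0 :: rest).getD j (0, 0))]
             ++ pvRender ((d0 :: rest).drop j)
termination_by l => l.length
decreasing_by simp

def get_instructions_alt (path : List (Int × Int)) : List String :=
  if path.length < 2 then []
  else pvRender ((path.zip path.tail).map (fun pq => get_delta pq.1 pq.2))

-- ===== PRECONDITION & SPEC =====
def Spec_get_instructions (path : List (Int × Int)) (out : List String) : Prop := out = get_instructions_alt path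
instance (path : List (Int × Int)) (out : List String) : Decidable (Spec_get_instructions path out) := by unfold Spec_get_instructions; infer_instance

-- ===== CLAIM (what is proved, stated in full; the proofs are below) =====
def Claim_equal_get_instructions : Prop := ∀ (path : List (Int × Int)), Dom_get_instructions path → Spec_get_instructions path (get_instructions path)

-- ===== LEMMAS AND PROOFS =====

-- reference recursion: what A's state machine emits from current_delta, step_count, remaining deltas
def pvEmit (cd : Int × Int) (cnt : Int) : List (Int × Int) → List String
  | [] => [pvFwd cnt]
  | nd :: rest =>
    if nd = cd then pvEmit cd (cnt + 1) rest
    else pvFwd cnt :: get_turn_instruction cd nd :: pvEmit nd 1 rest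

theorem pvFoldA (l : List (Int × Int)) : ∀ (ins : List String) (cd : Int × Int) (cnt : Int),
    (l.foldl pvStepA (ins, cd, cnt)).1 ++ [pvFwd (l.foldl pvStepA (ins, cd, cnt)).2.2]
      = ins ++ pvEmit cd cnt l := by
  induction l with
  | nil => intro ins cd cnt; simp [pvEmit]
  | cons nd rest ih =>
    intro ins cd cnt
    by_cases h : nd = cd
    · simp [List.foldl_cons, pvStepA, h, pvEmit, ih]
    · simp [List.foldl_cons, pvStepA, h, pvEmit, ih]

theorem pvFindK_le (d0 : Int × Int) (l : List (Int × Int)) : pvFindK d0 l ≤ l.length := by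
  induction l with
  | nil => simp [pvFindK]
  | cons x xs ih =>
    by_cases h : x = d0 <;> simp [pvFindK, h] <;> omega


-- A's emission, unrolled to its first run: forward (cnt + run length), then the turn and the rest
theorem pvEmit_eq (l : List (Int × Int)) : ∀ (cd : Int × Int) (cnt : Int),
    pvEmit cd cnt l =
      pvFwd (cnt + (pvFindK cd l : Int)) ::
        (match l.drop (pvFindK cd l) with
         | [] => []
         | nd :: rest' => get_turn_instruction cd nd :: pvEmit nd 1 rest') := by
  induction l with
  | nil => intro cd cnt; simp [pvEmit, pvFindK]
  | cons x xs ih =>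
    intro cd cnt
    by_cases h : x = cd
    · subst h
      rw [show pvEmit x cnt (x :: xs) = pvEmit x (cnt + 1) xs by simp [pvEmit]]
      rw [ih x (cnt + 1)]
      simp only [pvFindK]
      rw [show xs.drop (pvFindK x xs) = (x :: xs).drop (pvFindK x xs + 1) by simp]
      congr 1
      push_cast
      ring_nf
    · simp [pvEmit, h, pvFindK]

-- B's recursive render equals A's emission (strong induction on length)
theorem pvRender_eq (n : Nat) : ∀ (l : List (Int × Int)), l.length ≤ n →
    ∀ (d0 : Int × Int), pvRender (d0 :: l) = pvEmit d0 1 l := by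
  induction n with
  | zero =>
    intro l hl d0
    have hnil : l = [] := List.eq_nil_of_length_eq_zero (by omega)
    subst hnil
    rw [pvRender.eq_def]
    simp [pvFindK, pvEmit]
  | succ n ih =>
    intro l hl d0
    rw [pvEmit_eq]
    rw [pvRender.eq_def]
    simp only []
    by_cases hk : pvFindK d0 l = l.length
    · rw [if_pos (by omega)]
      rw [hk, List.drop_length]
      simp only []
      rw [show (((l.length + 1 : Nat)) : Int) = 1 + (l.length : Int) by push_cast; ring]
    · have hklt : pvFindK d0 l < l.length := lt_of_le_of_ne (pvFindK_le d0 l) hk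
      rw [if_neg (by omega)]
      have hdrop : l.drop (pvFindK d0 l) = l[pvFindK d0 l] :: l.drop (pvFindK d0 l + 1) :=
        List.drop_eq_getElem_cons hklt
      have hget : ((d0 :: l).getD (pvFindK d0 l + 1) (0, 0)) = l[pvFindK d0 l] := by
        rw [List.getD_cons_succ]
        exact List.getD_eq_getElem l _ hklt
      have hdrop2 : (d0 :: l).drop (pvFindK d0 l + 1) = l.drop (pvFindK d0 l) := by simp
      rw [hget, hdrop2, hdrop]
      have hlen : (l.drop (pvFindK d0 l + 1)).length ≤ n := by
        simp only [List.length_drop]; omega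
      rw [ih _ hlen]
      simp only [List.cons_append, List.nil_append]
      rw [show (((pvFindK d0 l + 1 : Nat)) : Int) = 1 + ((pvFindK d0 l) : Int) by push_cast; ring]

-- the loop over range(1, len-1) indexing path is the tail of the delta list
theorem pvMapRange (p0 p1 : Int × Int) (rest : List (Int × Int)) :
    (PySem.List.pyRange 1 ((p0 :: p1 :: rest).length - 1) 1).map
      (fun i => get_delta (PySem.List.pyGetD (p0 :: p1 :: rest) i (0, 0))
                          (PySem.List.pyGetD (p0 :: p1 :: rest) (i + 1) (0, 0)))
      = (((p0 :: p1 :: rest).zip (p1 :: rest)).map (fun pq => get_delta pq.1 pq.2)).tail := by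
  set path := p0 :: p1 :: rest with hpath
  have hlen : path.length = rest.length + 2 := by simp [hpath]
  apply List.ext_getElem
  · simp [PySem.List.length_pyRange_one, hlen, List.length_zip]
    omega
  · intro k hk1 hk2
    have hkr : k < rest.length := by
      simpa [PySem.List.length_pyRange_one, hlen] using hk1
    simp only [List.getElem_map, PySem.List.getElem_pyRange_one]
    have h1 : PySem.List.pyGetD path (1 + (k : Int)) (0, 0) = path[k + 1] := by
      rw [show (1 + (k : Int)) = ((k + 1 : Nat) : Int) by push_cast; ring]
      rw [PySem.List.pyGetD_natCast]
      rw [List.getD_eq_getElem _ _ (by omega)]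
    have h2 : PySem.List.pyGetD path (1 + (k : Int) + 1) (0, 0) = path[k + 2] := by
      rw [show (1 + (k : Int) + 1) = ((k + 2 : Nat) : Int) by push_cast; ring]
      rw [PySem.List.pyGetD_natCast]
      rw [List.getD_eq_getElem _ _ (by omega)]
    rw [h1, h2]
    rw [List.getElem_tail, List.getElem_map, List.getElem_zip]
    simp [hpath]

-- ===== VERDICT (by name: the statement is the Claim_ definition above) =====
theorem get_instructions_spec : Claim_equal_get_instructions := by
  intro path _
  unfold Spec_get_instructions get_instructions get_instructions_alt
  match path with
  | [] => simp
  | [p] => simp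
  | p0 :: p1 :: rest =>
    simp only [List.length_cons, show ¬ (rest.length + 1 + 1 < 2) by omega, if_false]
    rw [show (fun (st : List String × (Int × Int) × Int) i =>
          pvStepA st (get_delta (PySem.List.pyGetD (p0 :: p1 :: rest) i (0, 0))
            (PySem.List.pyGetD (p0 :: p1 :: rest) (i + 1) (0, 0))))
        = (fun st i => pvStepA st ((fun i => get_delta
            (PySem.List.pyGetD (p0 :: p1 :: rest) i (0, 0))
            (PySem.List.pyGetD (p0 :: p1 :: rest) (i + 1) (0, 0))) i)) from rfl,
      ← List.foldl_map]
    have hmr := pvMapRange p0 p1 rest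
    simp only [List.length_cons] at hmr
    rw [hmr]
    have hd0 : get_delta (PySem.List.pyGetD (p0 :: p1 :: rest) 0 (0, 0))
        (PySem.List.pyGetD (p0 :: p1 :: rest) 1 (0, 0)) = get_delta p0 p1 := by
      simp [PySem.List.pyGetD]
    rw [hd0, pvFoldA]
    simp only [List.tail_cons, List.zip_cons_cons, List.map_cons, List.tail_cons,
      List.nil_append]
    exact (pvRender_eq _ _ le_rfl _).symm
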